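-- pv_equiv track=rewrite | github.com/ErfanMoosavi/philo-chat-bot | bot/formatter.py | format_ai_message
-- ===== SOURCE A (Python) =====
-- def format_ai_message(message: str) -> str:
--     parts = message.split("*")
--     result = []
--     for i, part in enumerate(parts):
--         if i % 2 == 0:
--             result.append(part)
--         else:
--             result.append(f"<b>{part}</b>")
--     return "".join(result)
-- ===== SOURCE B (Python) =====
-- def format_ai_message(message: str) -> str:
--     out = []
--     bold = False
--     for ch in message:
--         if ch == "*":
--             out.append("</b>" if bold else "<b>")
--             bold = not bold
--         else:
--             out.append(ch)
--     if bold: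
--         out.append("</b>")
--     return "".join(out)
-- ===== Notes on version B (the rewrite author's own statement) =====
-- stated objective: alternative
-- what changed: Replaces splitting on the asterisk delimiter plus enumerate-parity wrapping by a single character pass with a bold-state toggle that emits <b>/</b> at each asterisk and flushes a closing tag if the state is still open at the end.
import Mathlib
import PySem

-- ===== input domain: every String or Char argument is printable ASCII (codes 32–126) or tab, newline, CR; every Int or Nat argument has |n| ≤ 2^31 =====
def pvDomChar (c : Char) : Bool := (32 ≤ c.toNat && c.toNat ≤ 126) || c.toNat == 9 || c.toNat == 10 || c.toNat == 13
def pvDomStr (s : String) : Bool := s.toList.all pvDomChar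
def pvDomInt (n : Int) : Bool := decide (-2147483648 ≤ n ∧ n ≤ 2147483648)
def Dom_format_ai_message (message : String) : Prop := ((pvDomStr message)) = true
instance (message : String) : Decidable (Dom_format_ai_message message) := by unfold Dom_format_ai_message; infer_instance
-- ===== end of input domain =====

-- B replaces delimiter-splitting + parity wrapping by one character pass with a bold-state toggle (same cost; alternative decomposition).

-- ===== PORT A =====
-- split on the asterisk, wrap odd-indexed parts in <b>…</b>, join (through List Char, exact)
def format_ai_message (message : String) : String :=
  let parts := PySem.Chars.splitOn message.toList "*".toList
  let result := (PySem.List.enumerate parts 0).foldl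
    (fun (r : List (List Char)) p =>
      if p.1 % 2 == 0 then r ++ [p.2]
      else r ++ ["<b>".toList ++ p.2 ++ "</b>".toList]) []
  String.mk (PySem.Chars.join [] result)

-- ===== PORT B =====
-- one pass over the characters with a bold flag; flush a closing tag if still open
def format_ai_message_alt (message : String) : String :=
  let st := message.toList.foldl
    (fun (st : List (List Char) × Bool) c =>
      if c = '*' then (st.1 ++ [if st.2 then "</b>".toList else "<b>".toList], !st.2)
      else (st.1 ++ [[c]], st.2)) ([], false)
  let out := if st.2 then st.1 ++ ["</b>".toList] else st.1
  String.mk (PySem.Chars.join [] out)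

-- ===== PRECONDITION & SPEC =====
def Spec_format_ai_message (message : String) (out : String) : Prop := out = format_ai_message_alt message
instance (message : String) (out : String) : Decidable (Spec_format_ai_message message out) := by unfold Spec_format_ai_message; infer_instance

-- ===== CLAIM (what is proved, stated in full; the proofs are below) =====
def Claim_equal_format_ai_message : Prop := ∀ (message : String), Dom_format_ai_message message → Spec_format_ai_message message (format_ai_message message)

-- ===== LEMMAS AND PROOFS =====

-- structural split on '*' with a prefix accumulator
def pvSp (pre : List Char) : List Char → List (List Char)
  | [] => [pre]
  | c :: t => if c = '*' then pre :: pvSp [] t else pvSp (pre ++ [c]) t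

-- render a parts list; the Bool is the parity (true = inside a bold slot)
def pvR : Bool → List (List Char) → List Char
  | _, [] => []
  | false, p :: ps => p ++ pvR true ps
  | true, p :: ps => "<b>".toList ++ p ++ "</b>".toList ++ pvR false ps

-- B as structural recursion
def pvGo : List Char → Bool → List Char
  | [], b => if b then "</b>".toList else []
  | c :: t, b =>
    if c = '*' then (if b then "</b>".toList else "<b>".toList) ++ pvGo t (!b)
    else c :: pvGo t b

theorem pvJoin_flatten (l : List (List Char)) : PySem.Chars.join [] l = l.flatten := by
  induction l with
  | nil => rfl
  | cons x xs ih =>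
    simp [PySem.Chars.join, List.intercalate] at ih ⊢
    cases xs <;> simp_all

theorem pvGo_go (fuel : Nat) (l cur : List Char) (acc : List (List Char))
    (h : l.length ≤ fuel) :
    PySem.Chars.splitOn.go ['*'] fuel l cur acc = acc.reverse ++ pvSp cur.reverse l := by
  induction fuel generalizing l cur acc with
  | zero =>
    cases l with
    | nil => simp [PySem.Chars.splitOn.go, pvSp]
    | cons c t => simp at h
  | succ n ih =>
    cases l with
    | nil => simp [PySem.Chars.splitOn.go, pvSp]
    | cons c t =>
      simp at h
      by_cases hc : c = '*'
      · subst hc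
        rw [PySem.Chars.splitOn.go]
        simp only [List.isPrefixOf, Bool.and_true, beq_self_eq_true, if_true, List.length_cons,
          List.drop_succ_cons, List.length_nil, List.drop_zero]
        rw [ih t [] _ h]
        simp [pvSp]
      · rw [PySem.Chars.splitOn.go]
        have hp : List.isPrefixOf ['*'] (c :: t) = false := by
          simp [List.isPrefixOf]
          exact fun hh => (hc hh.symm).elim
        rw [hp]
        simp only [if_false, Bool.false_eq_true]
        rw [ih t (c :: cur) acc (by omega)]
        simp [pvSp, hc]

theorem pvSplitOn_eq (s : List Char) : PySem.Chars.splitOn s "*".toList = pvSp [] s := by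
  unfold PySem.Chars.splitOn
  have : "*".toList = ['*'] := rfl
  rw [this, pvGo_go _ _ _ _ (by omega)]
  simp

-- A's enumerate-fold equals pvR at the right parity
theorem pvFoldA (parts : List (List Char)) (i : Int) (acc : List (List Char)) :
    ((PySem.List.enumerate parts i).foldl
      (fun (r : List (List Char)) p =>
        if p.1 % 2 == 0 then r ++ [p.2]
        else r ++ ["<b>".toList ++ p.2 ++ "</b>".toList]) acc).flatten
      = acc.flatten ++ pvR (decide (i % 2 ≠ 0)) parts := by
  induction parts generalizing i acc with
  | nil => simp [pvR]
  | cons p ps ih =>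
    rw [PySem.List.enumerate_cons, List.foldl_cons]
    by_cases hi : i % 2 = 0
    · have hb : (i % 2 == 0) = true := by simpa using hi
      have d0 : decide (i % 2 ≠ 0) = false := by simp [hi]
      have d1 : decide ((i + 1) % 2 ≠ 0) = true := by simp; omega
      simp only [hb, if_true]
      rw [ih (i + 1) (acc ++ [p]), d0, d1]
      simp [pvR]
    · have hb : (i % 2 == 0) = false := by simpa using hi
      have d0 : decide (i % 2 ≠ 0) = true := by simp [hi]
      have d1 : decide ((i + 1) % 2 ≠ 0) = false := by simp; omega
      simp only [hb, Bool.false_eq_true, if_false]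
      rw [ih (i + 1), d0, d1]
      simp [pvR]

-- B's fold equals pvGo after the final flush
theorem pvFoldB (t : List Char) (out : List (List Char)) (b : Bool) :
    (if (t.foldl
          (fun (st : List (List Char) × Bool) c =>
            if c = '*' then (st.1 ++ [if st.2 then "</b>".toList else "<b>".toList], !st.2)
            else (st.1 ++ [[c]], st.2)) (out, b)).2
      then (t.foldl
          (fun (st : List (List Char) × Bool) c =>
            if c = '*' then (st.1 ++ [if st.2 then "</b>".toList else "<b>".toList], !st.2)
            else (st.1 ++ [[c]], st.2)) (out, b)).1 ++ ["</b>".toList]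
      else (t.foldl
          (fun (st : List (List Char) × Bool) c =>
            if c = '*' then (st.1 ++ [if st.2 then "</b>".toList else "<b>".toList], !st.2)
            else (st.1 ++ [[c]], st.2)) (out, b)).1).flatten
      = out.flatten ++ pvGo t b := by
  induction t generalizing out b with
  | nil => cases b <;> simp [pvGo]
  | cons c t ih =>
    rw [List.foldl_cons]
    by_cases hc : c = '*'
    · subst hc
      cases b <;> simp only [if_true, Bool.not_true, Bool.not_false] <;>
        · rw [ih]
          simp [pvGo]
    · rw [if_neg hc]
      rw [ih]
      simp [pvGo, hc]

-- the bridge: rendering the split equals the toggle pass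
theorem pvBridge (t pre : List Char) (b : Bool) :
    pvR b (pvSp pre t) = (if b then "<b>".toList else []) ++ pre ++ pvGo t b := by
  induction t generalizing pre b with
  | nil => cases b <;> simp [pvSp, pvR, pvGo]
  | cons c t ih =>
    by_cases hc : c = '*'
    · subst hc
      cases b <;> simp [pvSp, pvR, pvGo, ih]
    · cases b <;> simp [pvSp, pvGo, hc, ih]

-- ===== VERDICT (by name: the statement is the Claim_ definition above) =====
theorem format_ai_message_spec : Claim_equal_format_ai_message := by
  intro message _
  unfold Spec_format_ai_message format_ai_message format_ai_message_alt
  apply congrArg String.mk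
  rw [pvJoin_flatten, pvJoin_flatten, pvSplitOn_eq]
  rw [pvFoldA (pvSp [] message.toList) 0 [], pvFoldB message.toList [] false]
  have hd : decide ((0 : Int) % 2 ≠ 0) = false := by decide
  rw [hd]
  simpa using pvBridge message.toList [] false
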